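-- pv_equiv track=rewrite | github.com/SAHIL511-JJ/leetcode-problems | count_luck.py | countLuck
-- ===== SOURCE A (Python) =====
-- def countLuck(matrix, k):
--     """
--     Determine if Hermione used her wand exactly k times to reach the exit.
--     She uses her wand when there are multiple paths to choose from.
--     """
--     n = len(matrix)
--     m = len(matrix[0])
--
--     # Find start and end positions
--     start = end = None
--     for i in range(n):
--         for j in range(m):
--             if matrix[i][j] == 'M':
--                 start = (i, j)
--             elif matrix[i][j] == '*':
--                 end = (i, j)
--
--     def count_neighbors(i, j, visited):
--         """Count valid unvisited neighbors"""
--         count = 0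
--         for di, dj in [(-1, 0), (1, 0), (0, -1), (0, 1)]:
--             ni, nj = i + di, j + dj
--             if (0 <= ni < n and 0 <= nj < m and
--                 (ni, nj) not in visited and matrix[ni][nj] != 'X'):
--                 count += 1
--         return count
--
--     def dfs(i, j, visited, wand_count):
--         """DFS to find path and count wand uses"""
--         if (i, j) == end:
--             return wand_count
--
--         visited.add((i, j))
--
--         # Count valid neighbors (decision points)
--         neighbors = count_neighbors(i, j, visited)
--
--         # If more than one choice, Hermione uses her wand
--         if neighbors > 1:
--             wand_count += 1
--
--         # Try all directions
--         for di, dj in [(-1, 0), (1, 0), (0, -1), (0, 1)]: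
--             ni, nj = i + di, j + dj
--             if (0 <= ni < n and 0 <= nj < m and
--                 (ni, nj) not in visited and matrix[ni][nj] != 'X'):
--                 result = dfs(ni, nj, visited, wand_count)
--                 if result is not None:
--                     return result
--
--         visited.remove((i, j))
--         return None
--
--     wand_uses = dfs(start[0], start[1], set(), 0)
--
--     return "Impressed" if wand_uses == k else "Oops!"
-- ===== SOURCE B (Python) =====
-- def countLuck(matrix, k):
--     """Iterative DFS with an explicit stack of frames instead of recursion."""
--     n = len(matrix)
--     m = len(matrix[0])
--
--     start = end = None
--     for i in range(n):
--         for j in range(m):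
--             if matrix[i][j] == 'M':
--                 start = (i, j)
--             elif matrix[i][j] == '*':
--                 end = (i, j)
--
--     DIRS = [(-1, 0), (1, 0), (0, -1), (0, 1)]
--
--     def open_neighbors(i, j, visited):
--         return sum(1 for di, dj in DIRS
--                    if 0 <= i + di < n and 0 <= j + dj < m
--                    and (i + di, j + dj) not in visited
--                    and matrix[i + di][j + dj] != 'X')
--
--     si, sj = start
--     if (si, sj) == end:
--         wand = 0
--     else:
--         wand = None
--         visited = {(si, sj)}
--         c = open_neighbors(si, sj, visited)
--         # frame: (i, j, wand count on entry, index of next direction to try)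
--         stack = [(si, sj, 1 if c > 1 else 0, 0)]
--         while stack:
--             i, j, wc, d = stack[-1]
--             if d == 4:
--                 stack.pop()
--                 visited.remove((i, j))
--                 continue
--             stack[-1] = (i, j, wc, d + 1)
--             ni, nj = i + DIRS[d][0], j + DIRS[d][1]
--             if (0 <= ni < n and 0 <= nj < m and
--                     (ni, nj) not in visited and matrix[ni][nj] != 'X'):
--                 if (ni, nj) == end:
--                     wand = wc
--                     break
--                 visited.add((ni, nj))
--                 c = open_neighbors(ni, nj, visited)
--                 stack.append((ni, nj, wc + (1 if c > 1 else 0), 0))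
--
--     return "Impressed" if wand == k else "Oops!"
-- ===== Notes on version B (the rewrite author's own statement) =====
-- stated objective: alternative
-- what changed: A's recursive backtracking dfs (with Python call-stack recursion) is replaced by an iterative DFS over an explicit stack of (cell, wand-count, next-direction) frames sharing one visited set, with identical visit order and wand counting.
import Mathlib
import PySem

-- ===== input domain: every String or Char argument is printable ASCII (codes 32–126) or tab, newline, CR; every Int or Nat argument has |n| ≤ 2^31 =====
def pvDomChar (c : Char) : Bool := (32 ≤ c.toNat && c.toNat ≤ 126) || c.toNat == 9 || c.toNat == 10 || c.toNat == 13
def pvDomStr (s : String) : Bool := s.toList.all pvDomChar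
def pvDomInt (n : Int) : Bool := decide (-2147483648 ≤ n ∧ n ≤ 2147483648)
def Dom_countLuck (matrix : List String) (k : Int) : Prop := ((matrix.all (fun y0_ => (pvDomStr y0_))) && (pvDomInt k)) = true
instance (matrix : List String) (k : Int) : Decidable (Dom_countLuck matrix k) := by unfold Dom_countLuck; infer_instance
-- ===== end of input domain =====

-- B replaces A's recursive backtracking dfs by an iterative DFS over an explicit stack of
-- frames (same visit order, same wand counting); equivalence is about the return value only.

-- Shared helpers (both Pythons contain the same scan loop, direction list and
-- neighbour-counting helper; ported once and used by both ports).
def pvDirs : List (Int × Int) := [(-1, 0), (1, 0), (0, -1), (0, 1)]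

-- matrix[i][j]; exact whenever 0 ≤ i < rows.length and 0 ≤ j < (rows[i]).length,
-- which every (guarded) use below satisfies on inputs admitted by Pre_.
def pvCell (rows : List (List Char)) (i j : Int) : Char :=
  (rows.getD i.toNat []).getD j.toNat ' '

-- the guard '0 <= ni < n and 0 <= nj < m and (ni,nj) not in visited and matrix[ni][nj] != 'X''
def pvOk (rows : List (List Char)) (n m : Int) (vis : PySem.Set (Int × Int)) (i j : Int) : Bool :=
  decide (0 ≤ i) && decide (i < n) && decide (0 ≤ j) && decide (j < m) &&
    !(PySem.Set.contains vis (i, j)) && decide (pvCell rows i j ≠ 'X')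

-- count_neighbors / open_neighbors (identical helper in both Pythons)
def pvCountNbrs (rows : List (List Char)) (n m : Int) (vis : PySem.Set (Int × Int))
    (i j : Int) : Int :=
  pvDirs.foldl (fun c d => if pvOk rows n m vis (i + d.1) (j + d.2) then c + 1 else c) 0

-- the start/end scan (last 'M' / last '*' in row-major order wins, as in Python)
def pvScan (rows : List (List Char)) (n m : Int) :
    Option (Int × Int) × Option (Int × Int) :=
  (PySem.List.pyRange 0 n 1).foldl
    (fun st i =>
      (PySem.List.pyRange 0 m 1).foldl
        (fun st j =>
          let c := pvCell rows i j
          if c = 'M' then (some (i, j), st.2)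
          else if c = '*' then (st.1, some (i, j))
          else st)
        st)
    (none, none)

-- ===== PORT A =====
-- A's recursive dfs. visited is threaded functionally: this is exact because A's dfs removes
-- (i,j) from visited before every 'return None', so a failing call restores visited; on the
-- successful call visited is never read again.  The fuel argument only realises termination:
-- the caller supplies n*m+2, more than the maximal recursion depth (each level adds one
-- distinct in-grid cell to visited), so the 0-fuel branch is never reached on admitted inputs.
mutual
def dfsA (rows : List (List Char)) (n m : Int) (eo : Option (Int × Int)) :
    Nat → Int → Int → PySem.Set (Int × Int) → Int → Option Int
  | 0, _, _, _, _ => none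
  | f + 1, i, j, vis, wc =>
    if some (i, j) = eo then some wc
    else
      let vis' := PySem.Set.add vis (i, j)
      let wc' := if pvCountNbrs rows n m vis' i j > 1 then wc + 1 else wc
      tryA rows n m eo f i j vis' wc' pvDirs
termination_by f _ _ _ _ => (f, 0)

-- A's 'for di, dj in [...]' loop: try each direction, return the first non-None child result
def tryA (rows : List (List Char)) (n m : Int) (eo : Option (Int × Int))
    (f : Nat) (i j : Int) (vis : PySem.Set (Int × Int)) (wc : Int) :
    List (Int × Int) → Option Int
  | [] => none
  | d :: ds =>
    let ni := i + d.1
    let nj := j + d.2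
    if pvOk rows n m vis ni nj then
      match dfsA rows n m eo f ni nj vis wc with
      | some r => some r
      | none => tryA rows n m eo f i j vis wc ds
    else tryA rows n m eo f i j vis wc ds
termination_by ds => (f, ds.length + 1)
end

def countLuck (matrix : List String) (k : Int) : String :=
  let rows := matrix.map String.toList
  let n : Int := matrix.length
  let m : Int := (rows.headD []).length
  match pvScan rows n m with
  | (none, _) => "Oops!"  -- Python raises TypeError here (start is None); excluded by Pre_
  | (some (si, sj), eo) =>
    if dfsA rows n m eo ((n * m).toNat + 2) si sj PySem.Set.empty 0 = some k then "Impressed"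
    else "Oops!"

-- ===== PORT B =====
-- B's while-loop over the explicit stack.  A frame is (i, j, wand count, remaining
-- directions, depth budget); the remaining-directions suffix of pvDirs is Source B's next-dir
-- index d, and the per-frame Nat only realises termination (the caller supplies n*m+1,
-- more than the maximal stack depth, so the 0-budget branch is never reached on admitted
-- inputs).  visited.remove is ported as Set.discard: the removed cell is always present.
def pvW : Nat → Nat
  | 0 => 1
  | f + 1 => 4 * pvW f + 2

theorem pvW_pos (f : Nat) : 0 < pvW f := by cases f <;> simp [pvW]

def pvMeasure (st : List (Int × Int × Int × List (Int × Int) × Nat)) : Nat :=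
  (st.map (fun fr => pvW fr.2.2.2.2 * fr.2.2.2.1.length + 1)).sum

def runB (rows : List (List Char)) (n m : Int) (eo : Option (Int × Int)) :
    List (Int × Int × Int × List (Int × Int) × Nat) → PySem.Set (Int × Int) → Option Int
  | [], _ => none
  | (i, j, _, [], _) :: rest, vis => runB rows n m eo rest (PySem.Set.discard vis (i, j))
  | (i, j, wc, d :: ds, f) :: rest, vis =>
    let ni := i + d.1
    let nj := j + d.2
    if pvOk rows n m vis ni nj then
      match f with
      | 0 => runB rows n m eo ((i, j, wc, ds, 0) :: rest) vis
      | f' + 1 =>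
        if some (ni, nj) = eo then some wc
        else
          let vis' := PySem.Set.add vis (ni, nj)
          let wc' := if pvCountNbrs rows n m vis' ni nj > 1 then wc + 1 else wc
          runB rows n m eo ((ni, nj, wc', pvDirs, f') :: (i, j, wc, ds, f' + 1) :: rest) vis'
    else runB rows n m eo ((i, j, wc, ds, f) :: rest) vis
termination_by st _ => pvMeasure st
decreasing_by
  · simp [pvMeasure]
  · simp [pvMeasure, Nat.mul_succ]; have := pvW_pos (0 : Nat); omega
  · simp [pvMeasure, pvDirs, pvW, Nat.mul_succ]; omega
  · simp [pvMeasure, Nat.mul_succ]; have := pvW_pos f; omega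

def countLuck_alt (matrix : List String) (k : Int) : String :=
  let rows := matrix.map String.toList
  let n : Int := matrix.length
  let m : Int := (rows.headD []).length
  match pvScan rows n m with
  | (none, _) => "Oops!"  -- Python raises TypeError here (start is None); excluded by Pre_
  | (some (si, sj), eo) =>
    let wand : Option Int :=
      if some (si, sj) = eo then some 0
      else
        let vis0 : PySem.Set (Int × Int) := PySem.Set.ofList [(si, sj)]
        let wc0 : Int := if pvCountNbrs rows n m vis0 si sj > 1 then 1 else 0
        runB rows n m eo [(si, sj, wc0, pvDirs, (n * m).toNat + 1)] vis0
    if wand = some k then "Impressed" else "Oops!"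

-- ===== PRECONDITION & SPEC =====
-- Pre_ excludes exactly the inputs where A raises: an empty matrix (IndexError on matrix[0]),
-- a row shorter than the first row (IndexError in the start/end scan), and a grid without 'M'
-- in the scanned columns (TypeError: start is None).  B raises on the same inputs.
def Pre_countLuck (matrix : List String) (k : Int) : Prop :=
  matrix ≠ [] ∧
  (∀ row ∈ matrix, (matrix.headD "").toList.length ≤ row.toList.length) ∧
  (∃ row ∈ matrix, 'M' ∈ row.toList.take (matrix.headD "").toList.length)

instance (matrix : List String) (k : Int) : Decidable (Pre_countLuck matrix k) := by
  unfold Pre_countLuck; infer_instance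

def pvWitness_countLuck : List String × Int := (["M."], 0)

def Spec_countLuck (matrix : List String) (k : Int) (out : String) : Prop := out = countLuck_alt matrix k
instance (matrix : List String) (k : Int) (out : String) : Decidable (Spec_countLuck matrix k out) := by unfold Spec_countLuck; infer_instance

-- ===== CLAIM (what is proved, stated in full; the proofs are below) =====
def Claim_equal_countLuck : Prop := ∀ (matrix : List String) (k : Int), Dom_countLuck matrix k → Pre_countLuck matrix k → Spec_countLuck matrix k (countLuck matrix k)

-- ===== LEMMAS AND PROOFS =====

-- removing the cell just added restores visited (the cell was not there before)
theorem pv_discard_add (vis : PySem.Set (Int × Int)) (x : Int × Int) (h : ¬ x ∈ vis) :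
    PySem.Set.discard (PySem.Set.add vis x) x = vis := by
  rw [PySem.Set.add_of_not_mem h]
  simp only [PySem.Set.discard, List.filter_append]
  simp only [List.filter_cons, List.filter_nil, beq_self_eq_true, Bool.not_true,
    Bool.false_eq_true, if_neg, reduceIte, List.append_nil]
  exact List.filter_eq_self.mpr (fun a ha => by simp; rintro rfl; exact h ha)

theorem pv_ok_not_mem (rows : List (List Char)) (n m : Int) (vis : PySem.Set (Int × Int))
    (i j : Int) (h : pvOk rows n m vis i j = true) : ¬ (i, j) ∈ vis := by
  simp only [pvOk, Bool.and_eq_true, Bool.not_eq_true'] at h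
  intro hm
  have h1 := h.1.2
  simp at h1
  exact h1 hm

-- the stack machine processes its top frame exactly as A's direction loop does:
-- the first non-None child result is returned, otherwise the frame is popped
-- and its cell removed from visited.
theorem pv_sim (rows : List (List Char)) (n m : Int) (eo : Option (Int × Int)) (f : Nat) :
    ∀ (ds : List (Int × Int)) (i j wc : Int)
      (rest : List (Int × Int × Int × List (Int × Int) × Nat)) (vis : PySem.Set (Int × Int)),
    runB rows n m eo ((i, j, wc, ds, f) :: rest) vis =
      (match tryA rows n m eo f i j vis wc ds with
       | some r => some r
       | none => runB rows n m eo rest (PySem.Set.discard vis (i, j))) := by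
  induction f using Nat.strong_induction_on with
  | _ f IHf =>
  intro ds
  induction ds with
  | nil =>
    intro i j wc rest vis
    rw [runB, tryA]
  | cons d ds IHds =>
    intro i j wc rest vis
    obtain ⟨di, dj⟩ := d
    rw [runB.eq_def, tryA]
    dsimp only
    by_cases hok : pvOk rows n m vis (i + di) (j + dj) = true
    · simp only [hok, if_true]
      cases f with
      | zero =>
        rw [dfsA]
        simpa using IHds i j wc rest vis
      | succ f' =>
        rw [dfsA]
        by_cases hend : some (i + di, j + dj) = eo
        · simp only [hend, if_true]
        · simp only [hend, if_false]
          rw [IHf f' (Nat.lt_succ_self f')]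
          rw [pv_discard_add vis (i + di, j + dj) (pv_ok_not_mem rows n m vis _ _ hok)]
          cases htry : tryA rows n m eo f' (i + di) (j + dj)
              (PySem.Set.add vis (i + di, j + dj))
              (if pvCountNbrs rows n m (PySem.Set.add vis (i + di, j + dj)) (i + di) (j + dj) > 1
               then wc + 1 else wc) pvDirs with
          | none => simp only []; exact IHds i j wc rest vis
          | some r => simp only []
    · simp only [hok, Bool.false_eq_true, if_false]
      exact IHds i j wc rest vis

-- A's dfs from the start cell equals B's whole stack loop
theorem pv_main (rows : List (List Char)) (n m : Int) (si sj : Int) (eo : Option (Int × Int)) :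
    dfsA rows n m eo ((n * m).toNat + 2) si sj PySem.Set.empty 0 =
      (if some (si, sj) = eo then some 0
       else
         runB rows n m eo
           [(si, sj,
             (if pvCountNbrs rows n m (PySem.Set.ofList [(si, sj)]) si sj > 1 then (1 : Int) else 0),
             pvDirs, (n * m).toNat + 1)]
           (PySem.Set.ofList [(si, sj)])) := by
  rw [show (n * m).toNat + 2 = ((n * m).toNat + 1) + 1 from rfl]
  rw [dfsA]
  by_cases hend : some (si, sj) = eo
  · simp only [hend, if_true]
  · simp only [hend, if_false]
    have hset : PySem.Set.add PySem.Set.empty (si, sj) = PySem.Set.ofList [(si, sj)] := rfl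
    rw [pv_sim]
    have h01 : (0 : Int) + 1 = 1 := by norm_num
    simp only [hset, h01]
    cases htry : tryA rows n m eo ((n * m).toNat + 1) si sj (PySem.Set.ofList [(si, sj)])
        (if pvCountNbrs rows n m (PySem.Set.ofList [(si, sj)]) si sj > 1 then (1 : Int) else 0)
        pvDirs with
    | none => rw [runB]
    | some r => rfl

-- ===== VERDICT (by name: the statement is the Claim_ definition above) =====
theorem countLuck_spec : Claim_equal_countLuck := by
  unfold Claim_equal_countLuck Spec_countLuck
  intro matrix k _ _
  unfold countLuck countLuck_alt
  simp only []
  cases hscan : pvScan (matrix.map String.toList) (matrix.length : Int)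
      (((matrix.map String.toList).headD []).length : Int) with
  | mk s eo =>
    cases s with
    | none => rfl
    | some p =>
      obtain ⟨si, sj⟩ := p
      simp only []
      rw [pv_main]
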